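-- pv_equiv track=rewrite | github.com/8bit-Dude/8bit-Unity | utils/scripts/apple/AppleHires.py | AssignColorGroup
-- ===== SOURCE A (Python) =====
-- def AssignColorGroup(pixels):
-- 	# Find group (Purple/Green) or (Blue/Orange) with most occurence
-- 	group1 = pixels.count(1)+pixels.count(2)
-- 	group2 = pixels.count(3)+pixels.count(4)
-- 	if group1 > group2:
-- 		block = [0,0]
-- 	else:
-- 		block = [128,128]
--
-- 	# Re-assign all colors according to that group
-- 	pixels = [1 if x==3 else x for x in pixels]
-- 	pixels = [2 if x==4 else x for x in pixels]
-- 	pixels = [3 if x==5 else x for x in pixels]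
-- 	return pixels, block
-- ===== SOURCE B (Python) =====
-- def AssignColorGroup(pixels):
--     # One pass: count both groups and remap each pixel as we go.
--     remap = {3: 1, 4: 2, 5: 3}
--     group1 = 0
--     group2 = 0
--     result = []
--     for x in pixels:
--         if x in (1, 2):
--             group1 += 1
--         elif x in (3, 4):
--             group2 += 1
--         result.append(remap.get(x, x))
--     block = [0, 0] if group1 > group2 else [128, 128]
--     return result, block
-- ===== Notes on version B (the rewrite author's own statement) =====
-- stated objective: simpler
-- what changed: Fuses A's four .count scans and three remapping comprehensions into a single loop that maintains two group counters and appends each pixel remapped through one dict {3:1,4:2,5:3}.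
import Mathlib
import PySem

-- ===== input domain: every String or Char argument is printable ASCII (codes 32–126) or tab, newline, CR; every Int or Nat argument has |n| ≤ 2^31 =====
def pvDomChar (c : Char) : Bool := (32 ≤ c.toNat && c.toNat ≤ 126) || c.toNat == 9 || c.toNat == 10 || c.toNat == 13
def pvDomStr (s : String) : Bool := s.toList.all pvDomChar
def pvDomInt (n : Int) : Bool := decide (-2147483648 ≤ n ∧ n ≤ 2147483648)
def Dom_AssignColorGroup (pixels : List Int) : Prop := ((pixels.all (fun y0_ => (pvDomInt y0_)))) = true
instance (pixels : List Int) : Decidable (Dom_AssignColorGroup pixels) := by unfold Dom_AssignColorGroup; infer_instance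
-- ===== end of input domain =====

-- B fuses A's four .count scans and three remapping comprehensions into one loop
-- with two counters and a single remap dict (objective: simpler, one pass).

-- ===== PORT A =====
def AssignColorGroup (pixels : List Int) : List Int × List Int :=
  let group1 := (PySem.List.count pixels 1 : Int) + (PySem.List.count pixels 2 : Int)
  let group2 := (PySem.List.count pixels 3 : Int) + (PySem.List.count pixels 4 : Int)
  let block : List Int := if group1 > group2 then [0, 0] else [128, 128]
  let pixels1 := pixels.map (fun x => if x == 3 then 1 else x)
  let pixels2 := pixels1.map (fun x => if x == 4 then 2 else x)
  let pixels3 := pixels2.map (fun x => if x == 5 then 3 else x)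
  (pixels3, block)

-- ===== PORT B =====
def pvRemap : PySem.Dict Int Int := PySem.Dict.ofList [(3, 1), (4, 2), (5, 3)]

def AssignColorGroup_alt (pixels : List Int) : List Int × List Int :=
  let st := pixels.foldl
    (fun (st : List Int × Int × Int) x =>
      let (result, group1, group2) := st
      if x == 1 || x == 2 then
        (result ++ [PySem.Dict.getD pvRemap x x], group1 + 1, group2)
      else if x == 3 || x == 4 then
        (result ++ [PySem.Dict.getD pvRemap x x], group1, group2 + 1)
      else
        (result ++ [PySem.Dict.getD pvRemap x x], group1, group2))
    ([], 0, 0)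
  (st.1, if st.2.1 > st.2.2 then [0, 0] else [128, 128])

-- ===== PRECONDITION & SPEC =====
def Spec_AssignColorGroup (pixels : List Int) (out : List Int × List Int) : Prop := out = AssignColorGroup_alt pixels
instance (pixels : List Int) (out : List Int × List Int) : Decidable (Spec_AssignColorGroup pixels out) := by unfold Spec_AssignColorGroup; infer_instance

-- ===== CLAIM (what is proved, stated in full; the proofs are below) =====
def Claim_equal_AssignColorGroup : Prop := ∀ (pixels : List Int), Dom_AssignColorGroup pixels → Spec_AssignColorGroup pixels (AssignColorGroup pixels)

-- ===== LEMMAS AND PROOFS =====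

-- closed form of B's one-pass fold, accumulator generalised
theorem alt_foldl_char (pixels : List Int) (r : List Int) (g1 g2 : Int) :
    pixels.foldl
      (fun (st : List Int × Int × Int) x =>
        let (result, group1, group2) := st
        if x == 1 || x == 2 then
          (result ++ [PySem.Dict.getD pvRemap x x], group1 + 1, group2)
        else if x == 3 || x == 4 then
          (result ++ [PySem.Dict.getD pvRemap x x], group1, group2 + 1)
        else
          (result ++ [PySem.Dict.getD pvRemap x x], group1, group2))
      (r, g1, g2)
    = (r ++ pixels.map (fun x => PySem.Dict.getD pvRemap x x),
       g1 + (pixels.count 1 : Int) + (pixels.count 2 : Int),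
       g2 + (pixels.count 3 : Int) + (pixels.count 4 : Int)) := by
  induction pixels generalizing r g1 g2 with
  | nil => simp
  | cons x xs ih =>
    simp only [List.foldl_cons, List.map_cons, List.count_cons]
    by_cases h1 : x = 1
    · subst h1; simp only [show ((1:Int) == 1 || (1:Int) == 2) = true by decide, if_true]
      rw [ih]; simp [Prod.ext_iff]; omega
    · by_cases h2 : x = 2
      · subst h2; simp only [show ((2:Int) == 1 || (2:Int) == 2) = true by decide, if_true]
        rw [ih]; simp [Prod.ext_iff]; omega
      · by_cases h3 : x = 3
        · subst h3; simp only [show ((3:Int) == 1 || (3:Int) == 2) = false by decide,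
            show ((3:Int) == 3 || (3:Int) == 4) = true by decide, if_true, Bool.false_eq_true, if_false]
          rw [ih]; simp [Prod.ext_iff]; omega
        · by_cases h4 : x = 4
          · subst h4; simp only [show ((4:Int) == 1 || (4:Int) == 2) = false by decide,
              show ((4:Int) == 3 || (4:Int) == 4) = true by decide, if_true, Bool.false_eq_true, if_false]
            rw [ih]; simp [Prod.ext_iff]; omega
          · have e1 : (x == 1 || x == 2) = false := by simp [h1, h2]
            have e2 : (x == 3 || x == 4) = false := by simp [h3, h4]
            simp only [e1, e2, Bool.false_eq_true, if_false]
            rw [ih]; simp [h1, h2, h3, h4]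

-- the fused remap equals A's three successive remapping passes
theorem remap_eq (x : Int) :
    PySem.Dict.getD pvRemap x x
      = (fun y => if y == 5 then 3 else y)
        ((fun y => if y == 4 then 2 else y)
         ((fun y => if y == 3 then 1 else y) x)) := by
  by_cases h3 : x = 3
  · subst h3; decide
  · by_cases h4 : x = 4
    · subst h4; decide
    · by_cases h5 : x = 5
      · subst h5; decide
      · have hd : pvRemap = PySem.Dict.mk [(3, 1), (4, 2), (5, 3)] := by decide
        have b3 : ((3 : Int) == x) = false := by rw [beq_eq_false_iff_ne]; exact fun h => h3 h.symm
        have b4 : ((4 : Int) == x) = false := by rw [beq_eq_false_iff_ne]; exact fun h => h4 h.symm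
        have b5 : ((5 : Int) == x) = false := by rw [beq_eq_false_iff_ne]; exact fun h => h5 h.symm
        simp [hd, PySem.Dict.getD, PySem.Dict.get?, List.find?, b3, b4, b5, h3, h4, h5]

-- ===== VERDICT (by name: the statement is the Claim_ definition above) =====
theorem AssignColorGroup_spec : Claim_equal_AssignColorGroup := by
  intro pixels _
  unfold Spec_AssignColorGroup AssignColorGroup AssignColorGroup_alt
  rw [alt_foldl_char]
  simp only [List.nil_append, PySem.List.count_eq, List.map_map, zero_add]
  exact Prod.ext (List.map_congr_left fun x _ => (remap_eq x).symm) rfl
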